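-- pv_equiv track=rewrite | github.com/jcb0152/advent2023 | solution15.py | hashval
-- ===== SOURCE A (Python) =====
-- def hashval(val):
--     currentValue = 0
--     for character in val:
--         ascVal = ord(character)
--         currentValue += ascVal
--         currentValue *= 17
--         currentValue = currentValue % 256
--     return currentValue
-- ===== SOURCE B (Python) =====
-- def hashval(val):
--     total = 0
--     power = 17
--     for character in reversed(val):
--         total = (total + ord(character) * power) % 256
--         power = power * 17 % 256
--     return total
-- ===== Notes on version B (the rewrite author's own statement) =====
-- stated objective: alternative
-- what changed: B computes the hash as a polynomial weighted sum over the reversed string (total += ord(c)*power, power *= 17, each reduced mod 256), instead of A's forward Horner-style (acc+ord)*17 %256 recurrence.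
import Mathlib
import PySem

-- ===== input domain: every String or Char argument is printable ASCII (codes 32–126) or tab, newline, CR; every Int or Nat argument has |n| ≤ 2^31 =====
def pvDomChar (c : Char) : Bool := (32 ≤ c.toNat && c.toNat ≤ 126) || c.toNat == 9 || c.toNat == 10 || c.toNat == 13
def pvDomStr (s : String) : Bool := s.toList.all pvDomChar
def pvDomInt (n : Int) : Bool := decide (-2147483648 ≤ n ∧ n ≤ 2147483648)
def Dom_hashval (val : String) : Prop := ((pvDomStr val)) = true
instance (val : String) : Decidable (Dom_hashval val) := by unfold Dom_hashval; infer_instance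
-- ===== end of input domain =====

-- B computes the hash as a weighted polynomial sum over the reversed string (ord(c)*17^k mod 256) instead of A's forward Horner-style recurrence (alternative decomposition, same cost).

-- ===== PORT A =====
def hashval (val : String) : Int :=
  val.toList.foldl
    (fun currentValue character =>
      PySem.Int.mod ((currentValue + (character.toNat : Int)) * 17) 256) 0

-- ===== PORT B =====
def hashval_alt (val : String) : Int :=
  let s := val.toList.reverse.foldl
    (fun (s : Int × Int) character =>
      (PySem.Int.mod (s.1 + (character.toNat : Int) * s.2) 256,
       PySem.Int.mod (s.2 * 17) 256)) (0, 17)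
  s.1

-- ===== PRECONDITION & SPEC =====
def Spec_hashval (val : String) (out : Int) : Prop := out = hashval_alt val
instance (val : String) (out : Int) : Decidable (Spec_hashval val out) := by unfold Spec_hashval; infer_instance

-- ===== CLAIM (what is proved, stated in full; the proofs are below) =====
def Claim_equal_hashval : Prop := ∀ (val : String), Dom_hashval val → Spec_hashval val (hashval val)

-- ===== LEMMAS AND PROOFS =====

-- the weighted polynomial sum Σ ord(c_i)·17^(len−i)
def pvW : List Char → Int
  | [] => 0
  | c :: cs => (c.toNat : Int) * 17 ^ (cs.length + 1) + pvW cs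

theorem pvA_fold (l : List Char) (a : Int) :
    l.foldl (fun currentValue character =>
      PySem.Int.mod ((currentValue + (character.toNat : Int)) * 17) 256) (a % 256)
      = (a * 17 ^ l.length + pvW l) % 256 := by
  induction l generalizing a with
  | nil => simp [pvW]
  | cons c cs ih =>
    simp only [List.foldl_cons,
      PySem.Int.mod_eq_emod_of_pos (show (0:Int) < 256 by norm_num)] at ih ⊢
    rw [ih ((a % 256 + (c.toNat : Int)) * 17)]
    have key : (a % 256) ≡ a [ZMOD (256:Int)] := Int.emod_emod_of_dvd a dvd_rfl
    have h2 : ((a % 256 + (c.toNat : Int)) * 17) * 17 ^ cs.length + pvW cs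
        ≡ ((a + (c.toNat : Int)) * 17) * 17 ^ cs.length + pvW cs [ZMOD (256:Int)] :=
      Int.ModEq.add_right _ (Int.ModEq.mul_right _ (Int.ModEq.mul_right _ (Int.ModEq.add_right _ key)))
    have h3 : ((a + (c.toNat : Int)) * 17) * 17 ^ cs.length + pvW cs
        = a * 17 ^ (c :: cs).length + pvW (c :: cs) := by
      simp [pvW]; ring
    rw [← h3]
    exact h2

theorem pvB_fold (l : List Char) :
    l.foldr (fun character (s : Int × Int) =>
      (PySem.Int.mod (s.1 + (character.toNat : Int) * s.2) 256,
       PySem.Int.mod (s.2 * 17) 256)) (0, 17)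
      = (pvW l % 256, 17 ^ (l.length + 1) % 256) := by
  induction l with
  | nil => simp [pvW]
  | cons c cs ih =>
    rw [List.foldr_cons, ih]
    simp only [PySem.Int.mod_eq_emod_of_pos (show (0:Int) < 256 by norm_num), pvW,
      List.length_cons, Prod.mk.injEq]
    constructor
    · have h1 : pvW cs % 256 + (c.toNat : Int) * (17 ^ (cs.length + 1) % 256)
          ≡ pvW cs + (c.toNat : Int) * 17 ^ (cs.length + 1) [ZMOD (256:Int)] :=
        Int.ModEq.add (Int.emod_emod_of_dvd _ dvd_rfl)
          (Int.ModEq.mul_left _ (Int.emod_emod_of_dvd _ dvd_rfl))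
      calc (pvW cs % 256 + (c.toNat : Int) * (17 ^ (cs.length + 1) % 256)) % 256
          = (pvW cs + (c.toNat : Int) * 17 ^ (cs.length + 1)) % 256 := h1
        _ = ((c.toNat : Int) * 17 ^ (cs.length + 1) + pvW cs) % 256 := by ring_nf
    · have h2 : 17 ^ (cs.length + 1) % 256 * 17 ≡ 17 ^ (cs.length + 1) * 17 [ZMOD (256:Int)] :=
        Int.ModEq.mul_right _ (Int.emod_emod_of_dvd _ dvd_rfl)
      calc (17 ^ (cs.length + 1) % 256 * 17) % 256
          = (17 ^ (cs.length + 1) * 17 : Int) % 256 := h2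
        _ = (17 ^ (cs.length + 1 + 1) : Int) % 256 := by ring_nf

-- ===== VERDICT (by name: the statement is the Claim_ definition above) =====
theorem hashval_spec : Claim_equal_hashval := by
  intro val _
  unfold Spec_hashval hashval hashval_alt
  rw [List.foldl_reverse, pvB_fold]
  have ha := pvA_fold val.toList 0
  norm_num at ha
  simpa [PySem.Int.mod_eq_emod_of_pos (show (0:Int) < 256 by norm_num)] using ha
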